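-- pv_equiv track=rewrite | github.com/rransom8774/pkpsig-smallcode | declare_paramsets.py | encode_bytes
-- ===== SOURCE A (Python) =====
-- def encode_bytes(M):
--     M2 = list()
--     if len(M) == 0:
--         return 0
--     if len(M) == 1:
--         nS, m = 0, M[0]
--         while m > 1:
--             nS += 1
--             m = (m+255)//256
--             pass
--         return nS
--     nS = 0
--     for i in range(0, len(M)-1, 2):
--         m2 = M[i]*M[i+1]
--         while m2 >= 16384:
--             nS += 1
--             m2 = (m2+255)//256
--             pass
--         M2.append(m2)
--         pass
--     if len(M) & 1:
--         M2.append(M[-1])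
--         pass
--     return nS + encode_bytes(M2)
-- ===== SOURCE B (Python) =====
-- def encode_bytes(M):
--     nS = 0
--     cur = list(M)
--     while len(cur) > 1:
--         nxt = []
--         it = iter(cur)
--         for a in it:
--             b = next(it, None)
--             if b is None:
--                 nxt.append(a)
--                 break
--             m2 = a * b
--             while m2 >= 16384:
--                 nS += 1
--                 m2 = (m2 + 255) // 256
--             nxt.append(m2)
--         cur = nxt
--     if cur:
--         m = cur[0]
--         while m > 1:
--             nS += 1
--             m = (m + 255) // 256
--     return nS
-- ===== Notes on version B (the rewrite author's own statement) =====
-- stated objective: alternative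
-- what changed: Replaces A's recursion (each level re-enters encode_bytes on the list of reduced pair products, with index-based range iteration) by a single iterative worklist loop that consumes the current level pairwise through an iterator and carries one running symbol count.
import Mathlib
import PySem

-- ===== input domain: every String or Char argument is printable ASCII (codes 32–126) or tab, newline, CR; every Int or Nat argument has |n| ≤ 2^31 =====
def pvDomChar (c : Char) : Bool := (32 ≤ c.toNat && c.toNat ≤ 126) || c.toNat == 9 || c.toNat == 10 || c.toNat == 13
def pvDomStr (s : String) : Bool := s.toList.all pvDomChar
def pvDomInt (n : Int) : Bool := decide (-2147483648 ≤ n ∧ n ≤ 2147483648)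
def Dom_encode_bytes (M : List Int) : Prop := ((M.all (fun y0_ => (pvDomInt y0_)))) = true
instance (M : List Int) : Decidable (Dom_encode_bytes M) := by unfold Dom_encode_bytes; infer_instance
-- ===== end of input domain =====

-- B replaces A's per-level recursion by one iterative worklist loop with a running count (alternative decomposition, same cost).

-- termination helper for the inner `while` loops of both ports
theorem pvRedDec {m : Int} (h : 1 < m) :
    (PySem.Int.floordiv (m + 255) 256).toNat < m.toNat := by
  rw [PySem.Int.floordiv_eq_ediv_of_pos (by norm_num)]
  omega

-- ===== PORT A =====
-- `while m > 1: nS += 1; m = (m+255)//256`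
def redBase (nS m : Int) : Int :=
  if h : 1 < m then redBase (nS + 1) (PySem.Int.floordiv (m + 255) 256) else nS
termination_by m.toNat
decreasing_by exact pvRedDec h

-- `while m2 >= 16384: nS += 1; m2 = (m2+255)//256`
def redPair (nS m2 : Int) : Int × Int :=
  if h : 16384 ≤ m2 then redPair (nS + 1) (PySem.Int.floordiv (m2 + 255) 256) else (nS, m2)
termination_by m2.toNat
decreasing_by exact pvRedDec (by omega)

-- one iteration of A's `for i in range(0, len(M)-1, 2)` body
def stepA (M : List Int) (st : Int × List Int) (i : Int) : Int × List Int :=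
  let m2 := (PySem.List.pyGet? M i).getD 0 * (PySem.List.pyGet? M (i + 1)).getD 0
  let r := redPair st.1 m2
  (r.1, st.2 ++ [r.2])

theorem pvFoldALen (M : List Int) (l : List Int) :
    ∀ (nS : Int) (acc : List Int),
      ((l.foldl (stepA M) (nS, acc)).2).length = acc.length + l.length := by
  induction l with
  | nil => intro nS acc; simp
  | cons i l ih =>
      intro nS acc
      simp only [List.foldl_cons, stepA]
      rw [ih]
      simp; omega

theorem pvLenRange2 (b : Int) :
    (PySem.List.pyRange 0 b 2).length = ((b + 1) / 2).toNat := by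
  rw [PySem.List.pyRange_of_pos 0 b (by norm_num)]
  simp only [List.length_map, List.length_range]
  split_ifs with h
  · omega
  · omega

def encode_bytes (M : List Int) : Int :=
  if M.length = 0 then 0
  else if M.length = 1 then redBase 0 ((PySem.List.pyGet? M 0).getD 0)
  else
    let st := (PySem.List.pyRange 0 ((M.length : Int) - 1) 2).foldl (stepA M) (0, [])
    let M2 := if M.length % 2 = 1 then st.2 ++ [(PySem.List.pyGet? M (-1)).getD 0] else st.2
    st.1 + encode_bytes M2
termination_by M.length
decreasing_by
  have h1 := pvFoldALen M (PySem.List.pyRange 0 ((M.length : Int) - 1) 2) 0 []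
  have h2 := pvLenRange2 ((M.length : Int) - 1)
  have hnil : ([] : List Int).length = 0 := rfl
  split_ifs with hp
  · simp only [List.length_append, List.length_singleton]
    omega
  · omega

-- ===== PORT B =====
-- B's `for a in it: b = next(it, None); …` over the current level
def pairPass (nS : Int) (rest : List Int) (nxt : List Int) : Int × List Int :=
  match rest with
  | [] => (nS, nxt)
  | [a] => (nS, nxt ++ [a])
  | a :: b :: t =>
      let r := redPair nS (a * b)
      pairPass r.1 t (nxt ++ [r.2])

theorem pvPairPassLen (rest : List Int) :
    ∀ (nS : Int) (nxt : List Int),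
      ((pairPass nS rest nxt).2).length = nxt.length + (rest.length + 1) / 2 := by
  match rest with
  | [] => intro nS nxt; simp [pairPass]
  | [a] => intro nS nxt; simp [pairPass]
  | a :: b :: t =>
      intro nS nxt
      simp only [pairPass]
      rw [pvPairPassLen t]
      simp; omega

-- B's `while len(cur) > 1` worklist loop, then the final base count
def altLoop (nS : Int) (cur : List Int) : Int :=
  if _h : 1 < cur.length then
    let st := pairPass nS cur []
    altLoop st.1 st.2
  else
    match cur with
    | x :: _ => redBase nS x
    | [] => nS
termination_by cur.length
decreasing_by
  have hpl := pvPairPassLen cur nS []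
  have hnil : ([] : List Int).length = 0 := rfl
  omega

def encode_bytes_alt (M : List Int) : Int := altLoop 0 M

-- ===== PRECONDITION & SPEC =====
def Spec_encode_bytes (M : List Int) (out : Int) : Prop := out = encode_bytes_alt M
instance (M : List Int) (out : Int) : Decidable (Spec_encode_bytes M out) := by unfold Spec_encode_bytes; infer_instance

-- ===== CLAIM (what is proved, stated in full; the proofs are below) =====
def Claim_equal_encode_bytes : Prop := ∀ (M : List Int), Dom_encode_bytes M → Spec_encode_bytes M (encode_bytes M)

-- ===== LEMMAS AND PROOFS =====

theorem redBase_add (nS m : Int) : redBase nS m = nS + redBase 0 m := by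
  conv_lhs => rw [redBase]
  conv_rhs => rw [redBase]
  split_ifs with h
  · rw [redBase_add (nS + 1), redBase_add (0 + 1)]
    ring
  · ring
termination_by m.toNat
decreasing_by all_goals exact pvRedDec h

theorem redPair_add (nS m2 : Int) :
    redPair nS m2 = (nS + (redPair 0 m2).1, (redPair 0 m2).2) := by
  conv_lhs => rw [redPair]
  conv_rhs => rw [redPair]
  split_ifs with h
  · rw [redPair_add (nS + 1), redPair_add (0 + 1)]
    simp only [Prod.mk.injEq]
    refine ⟨by ring, by trivial⟩
  · simp
termination_by m2.toNat
decreasing_by all_goals exact pvRedDec (by omega)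

-- range(0, n-1, 2) for n ≥ 2 is 0 followed by the shifted range of the tail
theorem pvRange2Cons (n : Nat) (h : 2 ≤ n) :
    PySem.List.pyRange 0 ((n : Int) - 1) 2 =
      0 :: (PySem.List.pyRange 0 ((n : Int) - 3) 2).map (· + 2) := by
  rw [PySem.List.pyRange_of_pos 0 ((n : Int) - 1) (by norm_num),
      PySem.List.pyRange_of_pos 0 ((n : Int) - 3) (by norm_num)]
  have hc : (if (0:Int) < (n : Int) - 1 then (((n : Int) - 1 - 0 + 2 - 1) / 2).toNat else 0)
      = (if (0:Int) < (n : Int) - 3 then (((n : Int) - 3 - 0 + 2 - 1) / 2).toNat else 0) + 1 := by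
    split_ifs <;> omega
  rw [hc, List.range_succ_eq_map]
  simp only [List.map_cons, List.map_map, Nat.cast_zero, mul_zero, add_zero]
  congr 1

theorem pvPyGetConsSucc {a : Int} {l : List Int} {i : Int} (hi : 0 ≤ i) :
    PySem.List.pyGet? (a :: l) (i + 1) = PySem.List.pyGet? l i := by
  simp only [PySem.List.pyGet?, PySem.List.pyIdx?, List.length_cons]
  split_ifs with h1 h2 h3 h4 <;> try omega
  · have : (i + 1).toNat = i.toNat + 1 := by omega
    simp [this]
  · simp

theorem pvStepAShift (a b : Int) (t : List Int) (st : Int × List Int) (i : Int) (hi : 0 ≤ i) :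
    stepA (a :: b :: t) st (i + 2) = stepA t st i := by
  have h1 : PySem.List.pyGet? (a :: b :: t) (i + 2) = PySem.List.pyGet? t i := by
    have e : i + 2 = (i + 1) + 1 := by ring
    rw [e, pvPyGetConsSucc (by omega), pvPyGetConsSucc hi]
  have h2 : PySem.List.pyGet? (a :: b :: t) (i + 2 + 1) = PySem.List.pyGet? t (i + 1) := by
    have e : i + 2 + 1 = (i + 1 + 1) + 1 := by ring
    rw [e, pvPyGetConsSucc (by omega), pvPyGetConsSucc (by omega)]
  simp [stepA, h1, h2]

-- the nS component of A's fold is additive, the list component accumulates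
theorem pvFoldShift (M : List Int) (l : List Int) :
    ∀ (nS : Int) (acc : List Int),
      l.foldl (stepA M) (nS, acc) =
        (nS + (l.foldl (stepA M) (0, ([] : List Int))).1,
         acc ++ (l.foldl (stepA M) (0, ([] : List Int))).2) := by
  induction l with
  | nil => intro nS acc; simp
  | cons i l ih =>
      intro nS acc
      simp only [List.foldl_cons]
      rw [ih (stepA M (nS, acc) i).1 (stepA M (nS, acc) i).2,
          ih (stepA M (0, []) i).1 (stepA M (0, []) i).2]
      simp only [stepA, redPair_add nS]
      simp [add_assoc]

-- B's pair pass computes exactly A's indexed fold plus A's odd-tail append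
theorem pairPass_eq (M : List Int) :
    ∀ (nS : Int) (acc : List Int),
      pairPass nS M acc =
        (((PySem.List.pyRange 0 ((M.length : Int) - 1) 2).foldl (stepA M) (nS, acc)).1,
         if M.length % 2 = 1
           then ((PySem.List.pyRange 0 ((M.length : Int) - 1) 2).foldl (stepA M) (nS, acc)).2
                  ++ [(PySem.List.pyGet? M (-1)).getD 0]
           else ((PySem.List.pyRange 0 ((M.length : Int) - 1) 2).foldl (stepA M) (nS, acc)).2) := by
  match M with
  | [] =>
      intro nS acc
      have hr : PySem.List.pyRange 0 (-1) 2 = ([] : List Int) := by decide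
      simp [pairPass, hr]
  | [x] =>
      intro nS acc
      have hr : PySem.List.pyRange 0 0 2 = ([] : List Int) := by decide
      simp [pairPass, hr, PySem.List.pyGet?_neg_one]
  | a :: b :: t =>
      intro nS acc
      have hstep0 : stepA (a :: b :: t) (nS, acc) 0 =
          ((redPair nS (a * b)).1, acc ++ [(redPair nS (a * b)).2]) := by
        simp [stepA, PySem.List.pyGet?_zero_cons]
      have hfold :
          (PySem.List.pyRange 0 (((a :: b :: t).length : Int) - 1) 2).foldl
              (stepA (a :: b :: t)) (nS, acc)
            = (PySem.List.pyRange 0 ((t.length : Int) - 1) 2).foldl (stepA t)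
                ((redPair nS (a * b)).1, acc ++ [(redPair nS (a * b)).2]) := by
        have hlen : (a :: b :: t).length = t.length + 2 := by simp
        have h3 : ((t.length + 2 : Nat) : Int) - 3 = (t.length : Int) - 1 := by push_cast; ring
        rw [hlen, pvRange2Cons (t.length + 2) (by omega), h3]
        simp only [List.foldl_cons, List.foldl_map, hstep0]
        exact PySem.List.foldl_congr_mem _ _ _ _ (fun st x hx =>
          pvStepAShift a b t st x ((PySem.List.mem_pyRange_iff_of_pos (by norm_num) x).1 hx).1)
      have hlhs : pairPass nS (a :: b :: t) acc
          = pairPass (redPair nS (a * b)).1 t (acc ++ [(redPair nS (a * b)).2]) := rfl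
      rw [hlhs, pairPass_eq t, hfold]
      cases t with
      | nil =>
          have hr : PySem.List.pyRange 0 (-1) 2 = ([] : List Int) := by decide
          simp [hr]
      | cons c u =>
          have hpar : ((a :: b :: c :: u).length % 2 = 1) ↔ ((c :: u).length % 2 = 1) := by
            simp; omega
          have hlast : PySem.List.pyGet? (a :: b :: c :: u) (-1)
              = PySem.List.pyGet? (c :: u) (-1) := by
            rw [PySem.List.pyGet?_neg_one, PySem.List.pyGet?_neg_one]
            simp [List.getLast?_cons_cons]
          by_cases hp : (c :: u).length % 2 = 1
          · rw [if_pos hp, if_pos (hpar.2 hp), hlast]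
          · rw [if_neg hp, if_neg (fun h => hp (hpar.1 h))]

-- B's worklist loop equals nS plus A's recursive count
theorem altLoop_eq (cur : List Int) : ∀ (nS : Int), altLoop nS cur = nS + encode_bytes cur := by
  intro nS
  rw [altLoop.eq_def]
  by_cases h : 1 < cur.length
  · rw [dif_pos h]
    show altLoop (pairPass nS cur []).1 (pairPass nS cur []).2 = nS + encode_bytes cur
    have hlt : (pairPass nS cur []).2.length < cur.length := by
      have hpl := pvPairPassLen cur nS []
      have hnil : ([] : List Int).length = 0 := rfl
      omega
    rw [altLoop_eq (pairPass nS cur []).2]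
    have hpp := pairPass_eq cur nS []
    rw [pvFoldShift cur (PySem.List.pyRange 0 ((cur.length : Int) - 1) 2) nS []] at hpp
    simp only [List.nil_append] at hpp
    rw [hpp]
    conv_rhs => rw [encode_bytes.eq_def]
    rw [if_neg (show ¬(cur.length = 0) by omega), if_neg (show ¬(cur.length = 1) by omega)]
    simp only []
    by_cases hp : cur.length % 2 = 1 <;> simp only [hp, if_true, if_false] <;> ring
  · rw [dif_neg h]
    cases cur with
    | nil =>
        rw [encode_bytes.eq_def]
        simp
    | cons x t =>
        cases t with
        | nil =>
            rw [encode_bytes.eq_def]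
            simp [redBase_add nS x]
        | cons y u =>
            have hlen : 1 < (x :: y :: u).length := by simp
            exact (h hlen).elim
termination_by cur.length
decreasing_by exact hlt

-- ===== VERDICT (by name: the statement is the Claim_ definition above) =====
theorem encode_bytes_spec : Claim_equal_encode_bytes := by
  intro M _
  unfold Spec_encode_bytes encode_bytes_alt
  rw [altLoop_eq M 0]
  simp
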